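-- pv_equiv track=rewrite | github.com/sukruti-shah/hack-fest | maximum_maximal_perfect_matching.py | maximum_matching
-- ===== SOURCE A (Python) =====
-- def maximum_matching(x,maximal):
--     mx = 0
--     for i in x:
--         if (len(i)>mx):
--             mx = len(i)
--     res = []
--     for i in x:
--         if (i and type(i[0]) != int and len(i) == mx):
--             res.append(i)
--     if (res):
--         return res
--     else:
--         return maximal
-- ===== SOURCE B (Python) =====
-- def maximum_matching(x, maximal):
--     # One pass: track the global max length and group qualifying sublists by length.
--     mx = 0
--     groups = {}
--     for i in x:
--         if len(i) > mx:
--             mx = len(i)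
--         if i and type(i[0]) != int:
--             groups.setdefault(len(i), []).append(i)
--     res = groups.get(mx, [])
--     return res if res else maximal
-- ===== Notes on version B (the rewrite author's own statement) =====
-- stated objective: alternative
-- what changed: Single pass maintaining the running max length and a dict grouping qualifying sublists by length, then one dict lookup, instead of A's two full scans of x.
import Mathlib
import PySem

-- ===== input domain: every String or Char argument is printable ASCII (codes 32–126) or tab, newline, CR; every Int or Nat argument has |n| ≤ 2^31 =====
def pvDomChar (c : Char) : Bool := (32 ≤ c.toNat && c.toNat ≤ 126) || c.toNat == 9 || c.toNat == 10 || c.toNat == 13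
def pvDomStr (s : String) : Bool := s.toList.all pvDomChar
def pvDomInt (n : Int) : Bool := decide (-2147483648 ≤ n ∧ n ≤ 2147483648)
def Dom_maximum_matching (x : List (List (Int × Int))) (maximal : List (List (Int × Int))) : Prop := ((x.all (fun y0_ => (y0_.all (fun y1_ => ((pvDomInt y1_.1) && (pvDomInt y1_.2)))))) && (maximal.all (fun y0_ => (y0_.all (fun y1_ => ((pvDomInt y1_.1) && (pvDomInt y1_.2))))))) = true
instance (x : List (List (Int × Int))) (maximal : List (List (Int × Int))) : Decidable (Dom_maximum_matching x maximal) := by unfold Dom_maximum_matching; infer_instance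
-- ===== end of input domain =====

-- ===== PORT A =====
-- Literal port of A: first pass computes mx; second pass collects non-empty sublists of
-- length mx (the Python test `type(i[0]) != int` is always True at this element type —
-- i[0] is a pair, never an int — so it ports to the trivially true conjunct it is).
def maximum_matching (x : List (List (Int × Int))) (maximal : List (List (Int × Int))) : List (List (Int × Int)) :=
  let mx : Int := x.foldl (fun mx i => if (i.length : Int) > mx then (i.length : Int) else mx) 0
  let res := x.foldl (fun res i => if i ≠ [] ∧ (i.length : Int) = mx then res ++ [i] else res) []
  if res ≠ [] then res else maximal

-- ===== PORT B =====
-- Port of B: one fold carrying (running max, length-keyed Dict of groups);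
-- `groups.setdefault(len(i), []).append(i)` is Dict.modify len [] (· ++ [i]).
def bStep (p : Int × PySem.Dict Int (List (List (Int × Int)))) (i : List (Int × Int)) :
    Int × PySem.Dict Int (List (List (Int × Int))) :=
  let mx := if (i.length : Int) > p.1 then (i.length : Int) else p.1
  let g := if i ≠ [] then p.2.modify (i.length : Int) [] (· ++ [i]) else p.2
  (mx, g)

def maximum_matching_alt (x : List (List (Int × Int))) (maximal : List (List (Int × Int))) : List (List (Int × Int)) :=
  let st := x.foldl bStep ((0 : Int), PySem.Dict.empty)
  let res := st.2.getD st.1 []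
  if res ≠ [] then res else maximal

-- ===== PRECONDITION & SPEC =====
def Spec_maximum_matching (x : List (List (Int × Int))) (maximal : List (List (Int × Int))) (out : List (List (Int × Int))) : Prop := out = maximum_matching_alt x maximal
instance (x : List (List (Int × Int))) (maximal : List (List (Int × Int))) (out : List (List (Int × Int))) : Decidable (Spec_maximum_matching x maximal out) := by unfold Spec_maximum_matching; infer_instance

-- ===== CLAIM (what is proved, stated in full; the proofs are below) =====
def Claim_equal_maximum_matching : Prop := ∀ (x : List (List (Int × Int))) (maximal : List (List (Int × Int))), Dom_maximum_matching x maximal → Spec_maximum_matching x maximal (maximum_matching x maximal)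

-- ===== LEMMAS AND PROOFS =====

-- ===== VERDICT (by name: the statement is the Claim_ definition above) =====
lemma bfold_inv (l : List (List (Int × Int))) :
    ∀ (mx : Int) (d : PySem.Dict Int (List (List (Int × Int)))),
    (l.foldl bStep (mx, d)).1
      = l.foldl (fun m i => if (i.length : Int) > m then (i.length : Int) else m) mx
    ∧ ∀ k : Int, (l.foldl bStep (mx, d)).2.getD k []
      = d.getD k [] ++ l.filter (fun i => decide (i ≠ [] ∧ (i.length : Int) = k)) := by
  induction l with
  | nil => intro mx d; simp
  | cons i t ih =>
    intro mx d
    obtain ⟨h1, h2⟩ := ih (bStep (mx, d) i).1 (bStep (mx, d) i).2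
    refine ⟨?_, ?_⟩
    · simpa [bStep] using h1
    · intro k
      have := h2 k
      simp only [List.foldl_cons] at *
      rw [this]
      by_cases hne : i = []
      · simp [bStep, hne]
      · by_cases hk : (i.length : Int) = k
        · simp [bStep, hne, hk, PySem.Dict.getD_modify_self]
        · simp only [bStep, hne, ite_not]
          simp [PySem.Dict.getD_modify, hk]
          intro h; exact absurd h.symm hk

theorem maximum_matching_spec : Claim_equal_maximum_matching := by
  intro x maximal _
  obtain ⟨h1, h2⟩ := bfold_inv x 0 PySem.Dict.empty
  simp only [Spec_maximum_matching, maximum_matching, maximum_matching_alt]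
  rw [h1, h2]
  simp [PySem.List.foldl_append_ite_eq_filter]
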